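-- pv_equiv track=rewrite | github.com/galdo/aurora | scripts/diagnostics/dlna_ui_backend_autotest.py | parse_hms_seconds
-- ===== SOURCE A (Python) =====
-- def parse_hms_seconds(value: str) -> int:
--     if not value or ":" not in value:
--         return 0
--     parts = value.split(":")
--     if len(parts) != 3:
--         return 0
--     try:
--         hours, minutes, seconds = [int(x) for x in parts]
--         return (hours * 3600) + (minutes * 60) + seconds
--     except Exception:
--         return 0
-- ===== SOURCE B (Python) =====
-- def parse_hms_seconds(value: str) -> int:
--     # Single character-level pass: a small state machine that never calls split()
--     # and never materialises a list of parts; fields are consumed as soon as a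
--     # ':' closes them, folding each into the running total.
--     total = 0
--     colons = 0
--     chunk = []
--     try:
--         for ch in value:
--             if ch == ':':
--                 total = total * 60 + int(''.join(chunk))
--                 colons += 1
--                 chunk = []
--             else:
--                 chunk.append(ch)
--         if colons != 2:
--             return 0
--         return total * 60 + int(''.join(chunk))
--     except ValueError:
--         return 0
-- ===== Notes on version B (the rewrite author's own statement) =====
-- stated objective: alternative
-- what changed: Replaces split-into-a-list + unpack + closed-form h*3600+m*60+s by a one-pass character-level state machine that never calls split(): it accumulates the current field's characters, folds each field into the running total the moment a ':' closes it, and counts colons instead of checking len(parts).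
import Mathlib
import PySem

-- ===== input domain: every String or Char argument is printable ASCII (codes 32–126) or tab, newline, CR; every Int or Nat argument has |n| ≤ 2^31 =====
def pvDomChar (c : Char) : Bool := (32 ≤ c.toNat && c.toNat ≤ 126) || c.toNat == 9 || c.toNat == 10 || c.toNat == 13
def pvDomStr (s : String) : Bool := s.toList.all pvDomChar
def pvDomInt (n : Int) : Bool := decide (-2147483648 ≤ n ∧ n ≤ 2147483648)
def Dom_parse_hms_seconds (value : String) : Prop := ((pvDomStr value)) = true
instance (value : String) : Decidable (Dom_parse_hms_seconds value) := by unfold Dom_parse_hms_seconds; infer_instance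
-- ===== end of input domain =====

-- B replaces split-into-parts + closed-form sum by a one-pass character state machine folding each field into the total as a ':' closes it (alternative decomposition, same cost).


-- ===== PORT A =====
def parse_hms_seconds (value : String) : Int :=
  if value == "" || !(PySem.Str.isIn ":" value) then 0
  else
    let parts := (PySem.Str.split? value ":").getD []  -- sep ":" ≠ "", so split? is some
    if parts.length ≠ 3 then 0
    else
      -- 'hours, minutes, seconds = [int(x) for x in parts]' with the try/except: any int() failure yields 0
      match PySem.Int.ofStr? (parts.getD 0 ""), PySem.Int.ofStr? (parts.getD 1 ""), PySem.Int.ofStr? (parts.getD 2 "") with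
      | some h, some m, some s => h * 3600 + m * 60 + s
      | _, _, _ => 0

-- ===== PORT B =====
-- 'total = total * 60 + int(''.join(chunk))'; none = a ValueError occurred (the try/except)
def pvHstep (t : Option Int) (chunk : List Char) : Option Int :=
  t.bind (fun tot => (PySem.Int.ofChars? chunk).map (fun n => tot * 60 + n))

-- one iteration of B's 'for ch in value' loop over the state (total, colons, chunk)
def pvStep (st : Option Int × Nat × List Char) (ch : Char) : Option Int × Nat × List Char :=
  if ch = ':' then (pvHstep st.1 st.2.2, st.2.1 + 1, [])
  else (st.1, st.2.1, st.2.2 ++ [ch])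

def parse_hms_seconds_alt (value : String) : Int :=
  let st := value.toList.foldl pvStep (some 0, 0, [])
  if st.2.1 ≠ 2 then 0
  else (pvHstep st.1 st.2.2).getD 0

-- ===== PRECONDITION & SPEC =====
def Spec_parse_hms_seconds (value : String) (out : Int) : Prop := out = parse_hms_seconds_alt value
instance (value : String) (out : Int) : Decidable (Spec_parse_hms_seconds value out) := by unfold Spec_parse_hms_seconds; infer_instance

-- ===== CLAIM (what is proved, stated in full; the proofs are below) =====
def Claim_equal_parse_hms_seconds : Prop := ∀ (value : String), Dom_parse_hms_seconds value → Spec_parse_hms_seconds value (parse_hms_seconds value)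

-- ===== LEMMAS AND PROOFS =====

theorem pvHeadI_tail (fs : List (List Char)) (lst : List Char) :
    ((fs ++ [lst]).headI) :: (fs ++ [lst]).tail = fs ++ [lst] := by
  cases fs <;> simp [List.headI]

-- the fields of l split at ':', as (all fields but the last, last field)
def pvSplitP : List Char → List (List Char) × List Char
  | [] => ([], [])
  | c :: r =>
      let p := pvSplitP r
      if c = ':' then ([] :: p.1, p.2)
      else match p with
        | ([], l) => ([], c :: l)
        | (f :: rest, l) => ((c :: f) :: rest, l)

theorem pvSplitP_fst_ne_nil_mem (l : List Char) (h : (pvSplitP l).1 ≠ []) : ':' ∈ l := by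
  induction l with
  | nil => simp [pvSplitP] at h
  | cons c r ih =>
      by_cases hc : c = ':'
      · simp [hc]
      · simp only [pvSplitP, hc, if_false] at h
        rcases hp : pvSplitP r with ⟨fs, lst⟩
        rw [hp] at h
        cases fs with
        | nil => simp at h
        | cons f rest =>
            right
            exact ih (by rw [hp]; simp)

theorem pvGo_spec (l : List Char) : ∀ (fuel : Nat), l.length ≤ fuel → ∀ (cur : List Char) (acc : List (List Char)),
    PySem.Chars.splitOn.go [':'] fuel l cur acc =
      acc.reverse ++ (cur.reverse ++ ((pvSplitP l).1 ++ [(pvSplitP l).2]).headI) :: ((pvSplitP l).1 ++ [(pvSplitP l).2]).tail := by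
  induction l with
  | nil =>
      intro fuel _ cur acc
      cases fuel <;> simp [PySem.Chars.splitOn.go, pvSplitP]
  | cons c r ih =>
      intro fuel hf cur acc
      cases fuel with
      | zero => simp at hf
      | succ f =>
          by_cases hc : c = ':'
          · subst hc
            have hpre : List.isPrefixOf [':'] (':' :: r) = true := by simp [List.isPrefixOf]
            rw [PySem.Chars.splitOn.go]
            simp only [hpre, if_true]
            rw [show List.drop [':'].length (':' :: r) = r from rfl,
              ih f (by simpa using hf) [] (cur.reverse :: acc)]
            rcases hp : pvSplitP r with ⟨fs, lst⟩
            simp [pvSplitP, hp, pvHeadI_tail fs lst]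
          · have hpre : List.isPrefixOf [':'] (c :: r) = false := by
              simp [List.isPrefixOf]; exact fun h => absurd h.symm hc
            rw [PySem.Chars.splitOn.go]
            simp only [hpre]
            rw [ih f (by simpa using hf) (c :: cur) acc]
            rcases hp : pvSplitP r with ⟨fs, lst⟩
            cases fs with
            | nil => simp [pvSplitP, hp, hc]
            | cons fh ft => simp [pvSplitP, hp, hc]

theorem pvSplitOn_eq (l : List Char) :
    PySem.Chars.splitOn l [':'] = (pvSplitP l).1 ++ [(pvSplitP l).2] := by
  rw [PySem.Chars.splitOn, pvGo_spec l (l.length + 1) (by omega) [] []]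
  simp [pvHeadI_tail]

-- B's loop over the fields of l
theorem pvFoldl_pvStep (l : List Char) : ∀ (t : Option Int) (k : Nat) (chunk : List Char),
    l.foldl pvStep (t, k, chunk) =
      match pvSplitP l with
      | ([], lst) => (t, k, chunk ++ lst)
      | (f :: rest, lst) => (List.foldl pvHstep t ((chunk ++ f) :: rest), k + rest.length + 1, lst) := by
  induction l with
  | nil => intro t k chunk; simp [pvSplitP]
  | cons c r ih =>
      intro t k chunk
      by_cases hc : c = ':'
      · subst hc
        have hstep : pvStep (t, k, chunk) ':' = (pvHstep t chunk, k + 1, []) := by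
          simp [pvStep]
        rw [List.foldl_cons, hstep, ih (pvHstep t chunk) (k + 1) []]
        rcases hp : pvSplitP r with ⟨fs, lst⟩
        cases fs with
        | nil => simp [pvSplitP, hp]
        | cons fh ft => simp [pvSplitP, hp]; omega
      · have hstep : pvStep (t, k, chunk) c = (t, k, chunk ++ [c]) := by
          simp [pvStep, hc]
        rw [List.foldl_cons, hstep, ih t k (chunk ++ [c])]
        rcases hp : pvSplitP r with ⟨fs, lst⟩
        cases fs with
        | nil => simp [pvSplitP, hp, hc]
        | cons fh ft => simp [pvSplitP, hp, hc]

theorem pvHorner3 (a b c : List Char) :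
    (pvHstep (pvHstep (pvHstep (some 0) a) b) c).getD 0 =
      match PySem.Int.ofChars? a, PySem.Int.ofChars? b, PySem.Int.ofChars? c with
      | some h, some m, some s => h * 3600 + m * 60 + s
      | _, _, _ => (0 : Int) := by
  rcases ha : PySem.Int.ofChars? a with _ | h <;>
    rcases hb : PySem.Int.ofChars? b with _ | m <;>
      rcases hc : PySem.Int.ofChars? c with _ | s <;>
        simp [pvHstep, ha, hb, hc, Option.bind, Option.map]
  ring

-- ===== VERDICT (by name: the statement is the Claim_ definition above) =====
theorem parse_hms_seconds_spec : Claim_equal_parse_hms_seconds := by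
  intro value _
  unfold Spec_parse_hms_seconds parse_hms_seconds parse_hms_seconds_alt
  have hsplit : PySem.Str.split? value ":" =
      some (((pvSplitP value.toList).1 ++ [(pvSplitP value.toList).2]).map String.ofList) := by
    rw [PySem.Str.split?]
    have : PySem.Chars.split? value.toList ":".toList =
        some ((pvSplitP value.toList).1 ++ [(pvSplitP value.toList).2]) := by
      rw [show (":".toList) = [':'] from rfl, PySem.Chars.split?]
      simp [pvSplitOn_eq]
    rw [this]; rfl
  rw [pvFoldl_pvStep]
  rcases hp : pvSplitP value.toList with ⟨fs, lst⟩
  rw [hp] at hsplit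
  match fs, hp with
  | [], hp =>
      -- one field: A returns 0 via the guard or the length test; B sees 0 colons
      simp [hsplit]
  | [f], hp =>
      simp [hsplit]
  | [f1, f2], hp =>
      -- exactly three fields: the guard cannot fire, both sides compute the same ints
      have hmem : ':' ∈ value.toList := pvSplitP_fst_ne_nil_mem _ (by rw [hp]; simp)
      have hin : PySem.Str.isIn ":" value = true := by
        rw [PySem.Str.isIn_iff_infix]
        obtain ⟨s, t, hst⟩ := List.append_of_mem hmem
        exact ⟨s, t, by simpa using hst.symm⟩
      have hne : (value == "") = false := by
        rw [beq_eq_false_iff_ne]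
        intro h; subst h; simp at hmem
      simp only [hne, hin, Bool.not_true, Bool.or_false, hsplit]
      simp [List.getD, pvHorner3]
  | f1 :: f2 :: f3 :: rest, hp =>
      simp [hsplit]
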